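-- pv_equiv track=rewrite | github.com/JanVargovsky/advent-of-code | 2019/15/15.py | fill_oxygen
-- ===== SOURCE A (Python) =====
-- NORTH = 1
--
-- SOUTH = 2
--
-- WEST = 3
--
-- EAST = 4
--
-- EMPTY = 1
--
-- OXYGEN = 2
--
-- def new_position(movement, x, y):
--     if movement == NORTH:
--         return (x, y - 1)
--     elif movement == SOUTH:
--         return (x, y + 1)
--     elif movement == WEST:
--         return (x - 1, y)
--     elif movement == EAST:
--         return (x + 1, y)
--
-- def fill_oxygen(map):
--     oxygen = next(k for k, v in map.items() if v == OXYGEN)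
--     minutes = 0
--     visited = set()
--     q = []
--     q.append((oxygen, 0))
--
--     while q:
--         (x, y), m = q.pop()
--         if (x, y) not in map or (x, y) in visited:
--             continue
--
--         visited.add((x, y))
--         if map[(x, y)] == EMPTY or map[(x, y)] == OXYGEN:
--             minutes = max(minutes, m)
--
--             for movement in [NORTH, SOUTH, WEST, EAST]:
--                 q.append((new_position(movement, x, y), m + 1))
--
--     return minutes
-- ===== SOURCE B (Python) =====
-- EMPTY = 1
--
-- OXYGEN = 2
--
-- def fill_oxygen(map):
--     oxygen = next(k for k, v in map.items() if v == OXYGEN)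
--     minutes = 0
--     visited = set()
--
--     def dfs(pos, m):
--         nonlocal minutes
--         if pos not in map or pos in visited:
--             return
--         visited.add(pos)
--         if map[pos] == EMPTY or map[pos] == OXYGEN:
--             minutes = max(minutes, m)
--             x, y = pos
--             dfs((x + 1, y), m + 1)
--             dfs((x - 1, y), m + 1)
--             dfs((x, y + 1), m + 1)
--             dfs((x, y - 1), m + 1)
--
--     dfs(oxygen, 0)
--     return minutes
-- ===== Notes on version B (the rewrite author's own statement) =====
-- stated objective: alternative
-- what changed: A's explicit stack loop (push four neighbours, pop and test at pop time) is replaced by a recursive DFS helper that threads the visited set and the running maximum through the calls, visiting neighbours in the stack's pop order EAST, WEST, SOUTH, NORTH.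
import Mathlib
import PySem

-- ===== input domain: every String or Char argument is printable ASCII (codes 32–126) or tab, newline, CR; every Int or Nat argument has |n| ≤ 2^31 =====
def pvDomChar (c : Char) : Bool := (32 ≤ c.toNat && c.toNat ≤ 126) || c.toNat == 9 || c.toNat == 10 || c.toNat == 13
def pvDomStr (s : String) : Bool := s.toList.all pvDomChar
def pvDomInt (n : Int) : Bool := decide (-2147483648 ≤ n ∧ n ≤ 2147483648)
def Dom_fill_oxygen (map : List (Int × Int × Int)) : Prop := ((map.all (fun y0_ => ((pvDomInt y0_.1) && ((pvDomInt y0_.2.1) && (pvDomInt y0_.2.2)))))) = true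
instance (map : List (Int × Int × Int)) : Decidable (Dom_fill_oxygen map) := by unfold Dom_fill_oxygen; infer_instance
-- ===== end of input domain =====

-- B replaces A's explicit-stack loop by a recursive DFS that threads the mutated
-- (visited, minutes) state through the recursive calls (same visit order, same value);
-- objective: alternative (same asymptotic cost).

-- Shared input marshalling: the Python argument is a dict {(x,y): v}, delivered as (x, y, v) triples.
def pvDict (map : List (Int × Int × Int)) : PySem.Dict (Int × Int) Int :=
  PySem.Dict.ofList (map.map (fun t => ((t.1, t.2.1), t.2.2)))

-- Boolean-membership helper used throughout.
theorem pv_not_mem {α : Type} [BEq α] [LawfulBEq α] (s : PySem.Set α) (x : α)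
    (h : PySem.Set.contains s x = false) : x ∉ s := by
  intro hm
  rw [(PySem.Set.contains_iff s x).mpr hm] at h
  simp at h

-- Termination measure for both traversals: number of map cells not yet visited.
def pvUnvisited (d : PySem.Dict (Int × Int) Int) (vis : PySem.Set (Int × Int)) : Nat :=
  ((PySem.Dict.keys d).filter (fun k => !(PySem.Set.contains vis k))).length


-- Visiting a fresh map cell strictly shrinks the measure (cited by the ports' decreasing_by).
theorem pvUnvisited_add_lt (d : PySem.Dict (Int × Int) Int) (vis : PySem.Set (Int × Int))
    (pos : Int × Int) (h1 : PySem.Dict.contains d pos = true)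
    (h2 : PySem.Set.contains vis pos = false) :
    pvUnvisited d (PySem.Set.add vis pos) < pvUnvisited d vis := by
  unfold pvUnvisited
  have hq : ∀ k : Int × Int, (!(PySem.Set.contains (PySem.Set.add vis pos) k)) = true →
      (!(PySem.Set.contains vis k)) = true := by
    intro k hk
    simp only [Bool.not_eq_true'] at *
    simp only [PySem.Set.contains_eq_listContains, List.contains_eq_mem, decide_eq_false_iff_not,
      PySem.Set.mem_add] at *
    exact fun hc => hk (Or.inl hc)
  have hmem : pos ∈ (PySem.Dict.keys d).filter (fun k => !(PySem.Set.contains vis k)) := by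
    rw [List.mem_filter]
    exact ⟨(PySem.Dict.contains_iff_mem_keys d pos).mp h1, by simp [pv_not_mem vis pos h2]⟩
  have hrw : (PySem.Dict.keys d).filter (fun k => !(PySem.Set.contains (PySem.Set.add vis pos) k)) =
      ((PySem.Dict.keys d).filter (fun k => !(PySem.Set.contains vis k))).filter
        (fun k => !(PySem.Set.contains (PySem.Set.add vis pos) k)) := by
    rw [List.filter_filter]
    apply List.filter_congr
    intro a _
    cases hqa : (!(PySem.Set.contains (PySem.Set.add vis pos) a)) with
    | false => simp
    | true => simp only [hq a hqa, Bool.and_true]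
  rw [hrw]
  rw [List.length_filter_lt_length_iff_exists]
  refine ⟨pos, hmem, ?_⟩
  simp [PySem.Set.mem_add]

-- Tiny Bool facts cited inside the ports' termination arguments (kept small on purpose).
theorem pv_cond_fst {a b : Bool} (h : ¬((!a || b) = true)) : a = true := by
  cases a <;> cases b <;> simp_all
theorem pv_cond_snd {a b : Bool} (h : ¬((!a || b) = true)) : b = false := by
  cases a <;> cases b <;> simp_all

-- ===== PORT A =====
-- A's while-loop over the stack q (q.pop() pops the END of the Python list; the stack is
-- modelled with its TOP at the head, so appending NORTH,SOUTH,WEST,EAST then popping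
-- yields EAST first: the head order below is EAST, WEST, SOUTH, NORTH).
-- map[(x,y)] is guarded by the 'in map' test, so getD is exact here.
def pvLoopA (d : PySem.Dict (Int × Int) Int) (visited : PySem.Set (Int × Int))
    (q : List ((Int × Int) × Int)) (minutes : Int) : Int :=
  match q with
  | [] => minutes
  | (pos, m) :: rest =>
    if h : (!(PySem.Dict.contains d pos) || PySem.Set.contains visited pos) = true then
      pvLoopA d visited rest minutes
    else
      let visited' := PySem.Set.add visited pos
      if PySem.Dict.getD d pos 0 == 1 || PySem.Dict.getD d pos 0 == 2 then
        pvLoopA d visited'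
          (((pos.1 + 1, pos.2), m + 1) :: ((pos.1 - 1, pos.2), m + 1) ::
           ((pos.1, pos.2 + 1), m + 1) :: ((pos.1, pos.2 - 1), m + 1) :: rest)
          (max minutes m)
      else pvLoopA d visited' rest minutes
termination_by (pvUnvisited d visited, q.length)
decreasing_by
  · exact Prod.Lex.right _ (Nat.lt_succ_self _)
  · exact Prod.Lex.left _ _ (pvUnvisited_add_lt d visited pos (pv_cond_fst h) (pv_cond_snd h))
  · exact Prod.Lex.left _ _ (pvUnvisited_add_lt d visited pos (pv_cond_fst h) (pv_cond_snd h))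

def fill_oxygen (map : List (Int × Int × Int)) : Int :=
  let d := pvDict map
  match (PySem.Dict.items d).find? (fun p => p.2 == 2) with
  | some (oxy, _) => pvLoopA d PySem.Set.empty [(oxy, 0)] 0
  | none => 0  -- unreachable under Pre_: the Python raises StopIteration here

-- ===== PORT B =====
-- B's recursive dfs; the Python mutates `visited` and `minutes`, which are threaded here
-- as the state pair st.  The fuel argument is only a totality guard: fill_oxygen_alt
-- supplies one more than the number of map cells, which bounds the recursion depth
-- (each nested level first visits a fresh map cell), so fuel 0 is never reached.
def pvDfs (d : PySem.Dict (Int × Int) Int) (fuel : Nat) (st : PySem.Set (Int × Int) × Int)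
    (pos : Int × Int) (m : Int) : PySem.Set (Int × Int) × Int :=
  match fuel with
  | 0 => st
  | Nat.succ fuel =>
    if (!(PySem.Dict.contains d pos) || PySem.Set.contains st.1 pos) = true then st
    else
      let vis := PySem.Set.add st.1 pos
      if PySem.Dict.getD d pos 0 == 1 || PySem.Dict.getD d pos 0 == 2 then
        let r2 := pvDfs d fuel (vis, max st.2 m) (pos.1 + 1, pos.2) (m + 1)
        let r3 := pvDfs d fuel r2 (pos.1 - 1, pos.2) (m + 1)
        let r4 := pvDfs d fuel r3 (pos.1, pos.2 + 1) (m + 1)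
        pvDfs d fuel r4 (pos.1, pos.2 - 1) (m + 1)
      else (vis, st.2)

def fill_oxygen_alt (map : List (Int × Int × Int)) : Int :=
  let d := pvDict map
  match (PySem.Dict.items d).find? (fun p => p.2 == 2) with
  | some (oxy, _) => (pvDfs d (PySem.Dict.size d + 1) (PySem.Set.empty, 0) oxy 0).2
  | none => 0  -- unreachable under Pre_: the Python raises StopIteration here

-- ===== PRECONDITION & SPEC =====
-- Pre_ excludes exactly the inputs whose dict contains no OXYGEN (=2) value:
-- there A's next(...) raises StopIteration (and so does B's).
def Pre_fill_oxygen (map : List (Int × Int × Int)) : Prop :=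
  ∃ p ∈ PySem.Dict.items (PySem.Dict.ofList (map.map (fun t => ((t.1, t.2.1), t.2.2)))), p.2 = 2
instance (map : List (Int × Int × Int)) : Decidable (Pre_fill_oxygen map) := by
  unfold Pre_fill_oxygen; infer_instance
def pvWitness_fill_oxygen : (List (Int × Int × Int)) := [(0, 0, 2), (1, 0, 1)]

def Spec_fill_oxygen (map : List (Int × Int × Int)) (out : Int) : Prop := out = fill_oxygen_alt map
instance (map : List (Int × Int × Int)) (out : Int) : Decidable (Spec_fill_oxygen map out) := by unfold Spec_fill_oxygen; infer_instance

-- ===== CLAIM (what is proved, stated in full; the proofs are below) =====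
def Claim_equal_fill_oxygen : Prop := ∀ (map : List (Int × Int × Int)), Dom_fill_oxygen map → Pre_fill_oxygen map → Spec_fill_oxygen map (fill_oxygen map)

-- ===== LEMMAS AND PROOFS =====
-- The measure is at most the number of dict entries.
theorem pvUnvisited_le_size (d : PySem.Dict (Int × Int) Int) :
    pvUnvisited d PySem.Set.empty ≤ PySem.Dict.size d := by
  unfold pvUnvisited
  calc ((PySem.Dict.keys d).filter _).length ≤ (PySem.Dict.keys d).length := List.length_filter_le _ _
  _ = PySem.Dict.size d := by simp [PySem.Dict.keys, PySem.Dict.size]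

-- The visited set only grows, so the measure never increases across a dfs call.
theorem pvDfs_mono (d : PySem.Dict (Int × Int) Int) :
    ∀ (f : Nat) (st : PySem.Set (Int × Int) × Int) (pos : Int × Int) (m : Int),
      pvUnvisited d (pvDfs d f st pos m).1 ≤ pvUnvisited d st.1 := by
  intro f
  induction f with
  | zero => intro st pos m; exact le_refl _
  | succ f ih =>
    intro st pos m
    rw [pvDfs]
    by_cases hskip : (!(PySem.Dict.contains d pos) || PySem.Set.contains st.1 pos) = true
    · simp only [if_pos hskip]
      exact le_refl _
    · simp only [if_neg hskip]
      have hlt := pvUnvisited_add_lt d st.1 pos (pv_cond_fst hskip) (pv_cond_snd hskip)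
      by_cases hval : (PySem.Dict.getD d pos 0 == 1 || PySem.Dict.getD d pos 0 == 2) = true
      · simp only [if_pos hval]
        exact le_of_lt (lt_of_le_of_lt (le_trans (ih _ _ _) (le_trans (ih _ _ _) (le_trans (ih _ _ _) (ih _ _ _)))) hlt)
      · simp only [if_neg hval]
        exact le_of_lt hlt

-- The bridge: with enough fuel, one pvDfs call computes exactly what A's loop does while
-- it works off the popped entry's whole DFS subtree.  Induction on the fuel.
theorem pv_bridge (d : PySem.Dict (Int × Int) Int) :
    ∀ (f : Nat) (vis : PySem.Set (Int × Int)) (mn : Int) (pos : Int × Int) (m : Int)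
      (q : List ((Int × Int) × Int)), pvUnvisited d vis < f →
      pvLoopA d vis ((pos, m) :: q) mn =
        pvLoopA d (pvDfs d f (vis, mn) pos m).1 q (pvDfs d f (vis, mn) pos m).2 := by
  intro f
  induction f with
  | zero => intro vis mn pos m q hn; omega
  | succ f ih =>
    intro vis mn pos m q hn
    by_cases hskip : (!(PySem.Dict.contains d pos) || PySem.Set.contains vis pos) = true
    · rw [pvLoopA, pvDfs]
      simp only [dif_pos hskip, if_pos hskip]
    · have hlt := pvUnvisited_add_lt d vis pos (pv_cond_fst hskip) (pv_cond_snd hskip)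
      have hle : pvUnvisited d (PySem.Set.add vis pos) < f := by omega
      by_cases hval : (PySem.Dict.getD d pos 0 == 1 || PySem.Dict.getD d pos 0 == 2) = true
      · rw [pvLoopA, pvDfs]
        simp only [dif_neg hskip, if_neg hskip, if_pos hval]
        have e1 := ih (PySem.Set.add vis pos) (max mn m) (pos.1 + 1, pos.2) (m + 1)
          (((pos.1 - 1, pos.2), m + 1) :: ((pos.1, pos.2 + 1), m + 1) ::
            ((pos.1, pos.2 - 1), m + 1) :: q) hle
        rw [e1]
        have h2le : pvUnvisited d (pvDfs d f (PySem.Set.add vis pos, max mn m) (pos.1 + 1, pos.2) (m + 1)).1 < f :=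
          lt_of_le_of_lt (pvDfs_mono d f (PySem.Set.add vis pos, max mn m) (pos.1 + 1, pos.2) (m + 1)) hle
        have e2 := ih (pvDfs d f (PySem.Set.add vis pos, max mn m) (pos.1 + 1, pos.2) (m + 1)).1
          (pvDfs d f (PySem.Set.add vis pos, max mn m) (pos.1 + 1, pos.2) (m + 1)).2
          (pos.1 - 1, pos.2) (m + 1)
          (((pos.1, pos.2 + 1), m + 1) :: ((pos.1, pos.2 - 1), m + 1) :: q) h2le
        rw [e2]
        have h3le : pvUnvisited d (pvDfs d f (pvDfs d f (PySem.Set.add vis pos, max mn m) (pos.1 + 1, pos.2) (m + 1)) (pos.1 - 1, pos.2) (m + 1)).1 < f :=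
          lt_of_le_of_lt (le_trans (pvDfs_mono d f _ _ _) (pvDfs_mono d f _ _ _)) hle
        have e3 := ih (pvDfs d f (pvDfs d f (PySem.Set.add vis pos, max mn m) (pos.1 + 1, pos.2) (m + 1)) (pos.1 - 1, pos.2) (m + 1)).1
          (pvDfs d f (pvDfs d f (PySem.Set.add vis pos, max mn m) (pos.1 + 1, pos.2) (m + 1)) (pos.1 - 1, pos.2) (m + 1)).2
          (pos.1, pos.2 + 1) (m + 1) (((pos.1, pos.2 - 1), m + 1) :: q) h3le
        rw [e3]
        have h4le : pvUnvisited d (pvDfs d f (pvDfs d f (pvDfs d f (PySem.Set.add vis pos, max mn m) (pos.1 + 1, pos.2) (m + 1)) (pos.1 - 1, pos.2) (m + 1)) (pos.1, pos.2 + 1) (m + 1)).1 < f :=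
          lt_of_le_of_lt (le_trans (pvDfs_mono d f _ _ _) (le_trans (pvDfs_mono d f _ _ _) (pvDfs_mono d f _ _ _))) hle
        have e4 := ih (pvDfs d f (pvDfs d f (pvDfs d f (PySem.Set.add vis pos, max mn m) (pos.1 + 1, pos.2) (m + 1)) (pos.1 - 1, pos.2) (m + 1)) (pos.1, pos.2 + 1) (m + 1)).1
          (pvDfs d f (pvDfs d f (pvDfs d f (PySem.Set.add vis pos, max mn m) (pos.1 + 1, pos.2) (m + 1)) (pos.1 - 1, pos.2) (m + 1)) (pos.1, pos.2 + 1) (m + 1)).2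
          (pos.1, pos.2 - 1) (m + 1) q h4le
        rw [e4]
      · rw [pvLoopA, pvDfs]
        simp only [dif_neg hskip, if_neg hskip, if_neg hval]

-- ===== VERDICT (by name: the statement is the Claim_ definition above) =====
theorem fill_oxygen_spec : Claim_equal_fill_oxygen := by
  intro map _ _
  unfold Spec_fill_oxygen fill_oxygen fill_oxygen_alt
  cases hfind : (PySem.Dict.items (pvDict map)).find? (fun p => p.2 == 2) with
  | none => simp [hfind]
  | some p =>
    obtain ⟨oxy, v⟩ := p
    simp only [hfind]
    rw [pv_bridge (pvDict map) (PySem.Dict.size (pvDict map) + 1)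
      PySem.Set.empty 0 oxy 0 [] (Nat.lt_succ_of_le (pvUnvisited_le_size (pvDict map)))]
    rw [pvLoopA]
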